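-- pv_equiv track=rewrite | github.com/KIM-DONGJU/Algorithm | Programmers/모의고사.py | solution
-- ===== SOURCE A (Python) =====
-- def solution(answers):
--     answer_list = [[1,2,3,4,5],[2, 1, 2, 3, 2, 4, 2, 5],[3, 3, 1, 1, 2, 2, 4, 4, 5, 5]]
--     score = [0] * 3
--     # 1,2,3번 수포자가 찍는 방식을 answer_list로 생성
--     # 각 수포자의 점수를 기록할 list 생성
--
--
--     for idx in range(len(answers)) :
--         if answer_list[0][idx%5] ==  answers[idx] :
--             score[0] += 1
--
--         if answer_list[1][idx%8] == answers[idx] :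
--             score[1] += 1
--
--         if answer_list[2][idx%10] == answers[idx] :
--             score[2] += 1
--
--     # 각 수포자가 찍는 방식의 개수가 다 다르기 때문에,
--     # 현재 index % 각 수포자의 답안 개수를 하여
--     # 현재 찍는 답안과 정답을 비교, 맞을 경우 해당 수포자의 score에 점수를 +1
--     best = max(score)
--
--     return [i+1 for i in range(3) if score[i] == best]
-- ===== SOURCE B (Python) =====
-- def solution(answers):
--     patterns = [[1, 2, 3, 4, 5],
--                 [2, 1, 2, 3, 2, 4, 2, 5],
--                 [3, 3, 1, 1, 2, 2, 4, 4, 5, 5]]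
--     # One pass: histogram of (question position mod 40, answer) pairs.
--     # 40 = lcm(5, 8, 10), so each pattern's guess is a function of idx % 40.
--     cnt = {}
--     for idx, a in enumerate(answers):
--         key = (idx % 40, a)
--         cnt[key] = cnt.get(key, 0) + 1
--     # Score each pattern from the histogram alone (no second pass over answers).
--     scores = [sum(cnt.get((j, pat[j % len(pat)]), 0) for j in range(40))
--               for pat in patterns]
--     best = max(scores)
--     return [i + 1 for i in range(3) if scores[i] == best]
-- ===== Notes on version B (the rewrite author's own statement) =====
-- stated objective: alternative
-- what changed: A scans the answers once, comparing each answer against all three patterns in the same loop via idx % len indexing and keeping three running scores; B instead builds a histogram (dict) of (idx % 40, answer) pairs in one pass -- 40 = lcm(5,8,10), so each pattern's guess depends only on idx % 40 -- and then computes each pattern's score purely from the 40-entry histogram without touching the answers again.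
import Mathlib
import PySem

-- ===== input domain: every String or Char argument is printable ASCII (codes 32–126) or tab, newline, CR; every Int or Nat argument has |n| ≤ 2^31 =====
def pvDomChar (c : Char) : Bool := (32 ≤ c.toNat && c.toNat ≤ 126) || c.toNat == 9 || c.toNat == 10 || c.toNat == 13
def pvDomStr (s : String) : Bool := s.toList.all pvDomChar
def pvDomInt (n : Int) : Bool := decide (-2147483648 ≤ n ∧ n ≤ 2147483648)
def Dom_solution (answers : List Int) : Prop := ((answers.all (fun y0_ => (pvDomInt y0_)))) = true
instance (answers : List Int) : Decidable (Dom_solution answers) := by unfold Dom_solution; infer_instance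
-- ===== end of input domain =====

-- B replaces A's interleaved three-score scan with a one-pass histogram of (idx % 40, answer)
-- pairs (40 = lcm of the pattern lengths) and scores each pattern from the histogram alone.

-- ===== PORT A =====
-- score ([0]*3) is represented as the triple (score[0], score[1], score[2]);
-- the loop 'for idx in range(len(answers))' is a foldl over List.range; idx ≥ 0 and
-- idx < len(answers), so Nat '%' and List.getD are exact for answer_list[k][idx%m] / answers[idx].
def solution (answers : List Int) : List Int :=
  let answer_list : List (List Int) :=
    [[1,2,3,4,5],[2,1,2,3,2,4,2,5],[3,3,1,1,2,2,4,4,5,5]]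
  let score : Int × Int × Int :=
    (List.range answers.length).foldl (fun s idx =>
      let s0 := if (answer_list.getD 0 []).getD (idx % 5) 0 = answers.getD idx 0 then s.1 + 1 else s.1
      let s1 := if (answer_list.getD 1 []).getD (idx % 8) 0 = answers.getD idx 0 then s.2.1 + 1 else s.2.1
      let s2 := if (answer_list.getD 2 []).getD (idx % 10) 0 = answers.getD idx 0 then s.2.2 + 1 else s.2.2
      (s0, s1, s2)) (0, 0, 0)
  let scoreL : List Int := [score.1, score.2.1, score.2.2]
  let best := (PySem.List.max? scoreL (fun x => x)).getD 0
  ((List.range 3).filter (fun i => scoreL.getD i 0 = best)).map (fun i => (i : Int) + 1)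

-- ===== PORT B =====
-- 'for idx, a in enumerate(answers): key = (idx % 40, a); cnt[key] = cnt.get(key, 0) + 1'
def bHist (answers : List Int) : PySem.Dict (Int × Int) Int :=
  (PySem.List.enumerate answers 0).foldl (fun d p =>
    d.insert (PySem.Int.mod p.1 40, p.2) (d.getD (PySem.Int.mod p.1 40, p.2) 0 + 1))
    PySem.Dict.empty

-- 'sum(cnt.get((j, pat[j % len(pat)]), 0) for j in range(40))'
-- (0 ≤ j % len(pat) < len(pat) always, so pyGetD with default 0 is exact for pat[j % len(pat)])
def bScore (cnt : PySem.Dict (Int × Int) Int) (pat : List Int) : Int :=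
  ((PySem.List.pyRange 0 40 1).map (fun j =>
    cnt.getD (j, PySem.List.pyGetD pat (PySem.Int.mod j (pat.length : Int)) 0) 0)).sum

def solution_alt (answers : List Int) : List Int :=
  let patterns : List (List Int) :=
    [[1,2,3,4,5],[2,1,2,3,2,4,2,5],[3,3,1,1,2,2,4,4,5,5]]
  let cnt := bHist answers
  let scores := patterns.map (bScore cnt)
  let best := (PySem.List.max? scores (fun x => x)).getD 0
  ((List.range 3).filter (fun i => scores.getD i 0 = best)).map (fun i => (i : Int) + 1)

-- ===== PRECONDITION & SPEC =====
def Spec_solution (answers : List Int) (out : List Int) : Prop := out = solution_alt answers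
instance (answers : List Int) (out : List Int) : Decidable (Spec_solution answers out) := by unfold Spec_solution; infer_instance

-- ===== CLAIM =====
def Claim_equal_solution : Prop := ∀ (answers : List Int), Dom_solution answers → Spec_solution answers (solution answers)

-- ===== LEMMAS AND PROOFS =====

-- the key list driving B's histogram
def keyList (answers : List Int) : List (Int × Int) :=
  (PySem.List.enumerate answers 0).map (fun p => (PySem.Int.mod p.1 40, p.2))

theorem bHist_getD (answers : List Int) (k : Int × Int) :
    (bHist answers).getD k 0 = ((keyList answers).count k : Int) := by
  have h : bHist answers
      = ((PySem.List.enumerate answers 0).map (fun p => (PySem.Int.mod p.1 40, p.2))).foldl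
          (fun d k => PySem.Dict.insert d k (d.getD k 0 + 1)) PySem.Dict.empty := by
    unfold bHist; rw [List.foldl_map]
  rw [h, PySem.Dict.getD_foldl_insert_add_one, keyList]
  simp [PySem.Dict.getD_empty]

-- the indicator sum over range(40): at most one j can hit the key (r, v)
theorem indicator_sum (pat : List Int) (r v : Int) (hr : 0 ≤ r) (hr40 : r < 40) :
    ((PySem.List.pyRange 0 40 1).map (fun j =>
      if ((r, v) : Int × Int) = (j, PySem.List.pyGetD pat (PySem.Int.mod j (pat.length : Int)) 0)
      then (1 : Int) else 0)).sum
    = (if PySem.List.pyGetD pat (PySem.Int.mod r (pat.length : Int)) 0 = v then 1 else 0) := by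
  have hfun : (fun j => if ((r, v) : Int × Int) = (j, PySem.List.pyGetD pat (PySem.Int.mod j (pat.length : Int)) 0) then (1 : Int) else 0)
      = (fun j => if (decide (((r, v) : Int × Int) = (j, PySem.List.pyGetD pat (PySem.Int.mod j (pat.length : Int)) 0))) = true then (1 : Int) else 0) := by
    funext j; simp
  rw [hfun, PySem.List.sum_map_ite_one_zero]
  by_cases h : PySem.List.pyGetD pat (PySem.Int.mod r (pat.length : Int)) 0 = v
  · simp only [h, if_true]
    have hc : List.countP
        (fun j => decide (((r, v) : Int × Int) = (j, PySem.List.pyGetD pat (PySem.Int.mod j (pat.length : Int)) 0)))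
        (PySem.List.pyRange 0 40 1)
        = List.count r (PySem.List.pyRange 0 40 1) := by
      apply List.countP_congr
      intro j _
      constructor
      · intro hj
        have := (Prod.mk.injEq _ _ _ _).mp (of_decide_eq_true hj)
        simp [this.1.symm]
      · intro hj
        have hjr : j = r := by simpa using hj
        subst hjr
        simp [h]
    rw [hc, List.count_eq_one_of_mem (PySem.List.nodup_pyRange_one 0 40)
          ((PySem.List.mem_pyRange_one).mpr ⟨hr, hr40⟩)]
    simp
  · simp only [h, if_false]
    have hc : List.countP
        (fun j => decide (((r, v) : Int × Int) = (j, PySem.List.pyGetD pat (PySem.Int.mod j (pat.length : Int)) 0)))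
        (PySem.List.pyRange 0 40 1) = 0 := by
      apply List.countP_eq_zero.mpr
      intro j _
      simp only [decide_eq_true_eq, Prod.mk.injEq, not_and]
      intro hjr; subst hjr; intro hv; exact h hv.symm
    rw [hc]
    simp

-- the key list of answers ++ [a] appends one key
theorem keyList_append (answers : List Int) (a : Int) :
    keyList (answers ++ [a])
      = keyList answers ++ [(PySem.Int.mod (answers.length : Int) 40, a)] := by
  unfold keyList
  rw [PySem.List.enumerate_append]
  simp [PySem.List.enumerate_cons, PySem.List.enumerate_nil]

-- appending one answer bumps a pattern's histogram score by the match indicator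
theorem score_append (answers : List Int) (a : Int) (pat : List Int)
    (hpat : pat ≠ []) (hdvd : pat.length ∣ 40) :
    bScore (bHist (answers ++ [a])) pat
    = bScore (bHist answers) pat
      + (if pat.getD (answers.length % pat.length) 0 = a then 1 else 0) := by
  have hm : 0 < pat.length := List.length_pos_iff.mpr hpat
  unfold bScore
  have hpt : ∀ (L : List Int), (fun j => (bHist L).getD (j, PySem.List.pyGetD pat (PySem.Int.mod j (pat.length : Int)) 0) 0)
      = fun j => (((keyList L).count (j, PySem.List.pyGetD pat (PySem.Int.mod j (pat.length : Int)) 0) : Nat) : Int) := by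
    intro L; funext j; rw [bHist_getD]
  rw [hpt, hpt, keyList_append]
  have hsplit : (fun j => (((keyList answers ++ [(PySem.Int.mod (answers.length : Int) 40, a)]).count
        (j, PySem.List.pyGetD pat (PySem.Int.mod j (pat.length : Int)) 0) : Nat) : Int))
      = fun j => (((keyList answers).count (j, PySem.List.pyGetD pat (PySem.Int.mod j (pat.length : Int)) 0) : Nat) : Int)
          + (if ((PySem.Int.mod (answers.length : Int) 40, a) : Int × Int)
                = (j, PySem.List.pyGetD pat (PySem.Int.mod j (pat.length : Int)) 0) then (1 : Int) else 0) := by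
    funext j
    rw [List.count_append, List.count_singleton]
    push_cast
    simp
  rw [hsplit, PySem.List.sum_map_add_int, indicator_sum pat _ a
        (PySem.Int.mod_nonneg _ (by norm_num)) (PySem.Int.mod_lt _ (by norm_num))]
  congr 1
  have h40 : PySem.Int.mod (answers.length : Int) 40 = ((answers.length % 40 : Nat) : Int) := by
    exact_mod_cast PySem.Int.mod_natCast answers.length 40
  rw [h40]
  have hmm : PySem.Int.mod ((answers.length % 40 : Nat) : Int) (pat.length : Int)
      = ((answers.length % 40 % pat.length : Nat) : Int) := by
    exact_mod_cast PySem.Int.mod_natCast (answers.length % 40) pat.length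
  rw [hmm, Nat.mod_mod_of_dvd _ hdvd, PySem.List.pyGetD_natCast]

-- A's interleaved index loop computes the three histogram scores
theorem afold_eq (ans : List Int) :
    (List.range ans.length).foldl (fun (s : Int × Int × Int) idx =>
      let s0 := if (([[1,2,3,4,5],[2,1,2,3,2,4,2,5],[3,3,1,1,2,2,4,4,5,5]] : List (List Int)).getD 0 []).getD (idx % 5) 0 = ans.getD idx 0 then s.1 + 1 else s.1
      let s1 := if (([[1,2,3,4,5],[2,1,2,3,2,4,2,5],[3,3,1,1,2,2,4,4,5,5]] : List (List Int)).getD 1 []).getD (idx % 8) 0 = ans.getD idx 0 then s.2.1 + 1 else s.2.1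
      let s2 := if (([[1,2,3,4,5],[2,1,2,3,2,4,2,5],[3,3,1,1,2,2,4,4,5,5]] : List (List Int)).getD 2 []).getD (idx % 10) 0 = ans.getD idx 0 then s.2.2 + 1 else s.2.2
      (s0, s1, s2)) (0, 0, 0)
    = (bScore (bHist ans) [1,2,3,4,5], bScore (bHist ans) [2,1,2,3,2,4,2,5],
       bScore (bHist ans) [3,3,1,1,2,2,4,4,5,5]) := by
  induction ans using List.reverseRecOn with
  | nil => decide
  | append_singleton t a ih =>
    rw [List.length_append, List.length_singleton, List.range_succ, List.foldl_append]
    have hcongr : (List.range t.length).foldl (fun (s : Int × Int × Int) idx =>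
        let s0 := if (([[1,2,3,4,5],[2,1,2,3,2,4,2,5],[3,3,1,1,2,2,4,4,5,5]] : List (List Int)).getD 0 []).getD (idx % 5) 0 = (t ++ [a]).getD idx 0 then s.1 + 1 else s.1
        let s1 := if (([[1,2,3,4,5],[2,1,2,3,2,4,2,5],[3,3,1,1,2,2,4,4,5,5]] : List (List Int)).getD 1 []).getD (idx % 8) 0 = (t ++ [a]).getD idx 0 then s.2.1 + 1 else s.2.1
        let s2 := if (([[1,2,3,4,5],[2,1,2,3,2,4,2,5],[3,3,1,1,2,2,4,4,5,5]] : List (List Int)).getD 2 []).getD (idx % 10) 0 = (t ++ [a]).getD idx 0 then s.2.2 + 1 else s.2.2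
        (s0, s1, s2)) (0, 0, 0)
      = (List.range t.length).foldl (fun (s : Int × Int × Int) idx =>
        let s0 := if (([[1,2,3,4,5],[2,1,2,3,2,4,2,5],[3,3,1,1,2,2,4,4,5,5]] : List (List Int)).getD 0 []).getD (idx % 5) 0 = t.getD idx 0 then s.1 + 1 else s.1
        let s1 := if (([[1,2,3,4,5],[2,1,2,3,2,4,2,5],[3,3,1,1,2,2,4,4,5,5]] : List (List Int)).getD 1 []).getD (idx % 8) 0 = t.getD idx 0 then s.2.1 + 1 else s.2.1
        let s2 := if (([[1,2,3,4,5],[2,1,2,3,2,4,2,5],[3,3,1,1,2,2,4,4,5,5]] : List (List Int)).getD 2 []).getD (idx % 10) 0 = t.getD idx 0 then s.2.2 + 1 else s.2.2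
        (s0, s1, s2)) (0, 0, 0) := by
      apply PySem.List.foldl_congr_mem
      intro acc idx hidx
      have hlt : idx < t.length := List.mem_range.mp hidx
      rw [List.getD_append _ _ _ _ hlt]
    rw [hcongr, ih]
    have hget : (t ++ [a]).getD t.length 0 = a := by
      simp [List.getD]
    rw [score_append t a [1,2,3,4,5] (by simp) (by norm_num),
        score_append t a [2,1,2,3,2,4,2,5] (by simp) (by norm_num),
        score_append t a [3,3,1,1,2,2,4,4,5,5] (by simp) (by norm_num)]
    simp only [List.foldl_cons, List.foldl_nil, hget, List.length_cons, List.length_nil,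
      List.getD_cons_zero, List.getD_cons_succ]
    norm_num
    refine ⟨?_, ?_, ?_⟩ <;> (split_ifs <;> omega)

-- ===== VERDICT =====
theorem solution_spec : Claim_equal_solution := by
  intro answers _
  show solution answers = solution_alt answers
  simp only [solution, solution_alt]
  rw [afold_eq]
  rfl
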